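-- pv_equiv track=rewrite | github.com/sni10/game_zelda | src/factories/world_factory.py | _create_underground_caverns
-- ===== SOURCE A (Python) =====
-- from typing import List, Dict, Tuple, Optional
--
-- def _create_underground_caverns(width: int, height: int) -> List[List[str]]:
--     """Создать подземные пещеры"""
--     tile_width = width // 32
--     tile_height = height // 32
--
--     underground_map = []
--     for y in range(tile_height):
--         row = []
--         for x in range(tile_width):
--             # Создаем пещерную структуру
--             if x == 0 or x == tile_width - 1 or y == 0 or y == tile_height - 1:
--                 row.append('#')  # Стены пещеры
--             elif (x + y) % 7 == 0:
--                 row.append('L')  # Лава (специальный символ)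
--             elif (x * y) % 11 == 0:
--                 row.append('#')  # Столбы/препятствия
--             else:
--                 row.append('.')  # Проходимые области
--         underground_map.append(row)
--
--     return underground_map
-- ===== SOURCE B (Python) =====
-- from typing import List
--
--
-- def _create_underground_caverns(width: int, height: int) -> List[List[str]]:
--     """Create the cavern grid in four whole-grid passes instead of one per-cell cascade."""
--     tw = width // 32
--     th = height // 32
--     # pass 0: all floor
--     grid = [['.' for _ in range(tw)] for _ in range(th)]
--     # pass 1: lava
--     grid = [['L' if (x + y) % 7 == 0 else c
--              for x, c in enumerate(row)] for y, row in enumerate(grid)]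
--     # pass 2: pillars (never over lava)
--     grid = [['#' if (x * y) % 11 == 0 and c != 'L' else c
--              for x, c in enumerate(row)] for y, row in enumerate(grid)]
--     # pass 3: border walls override everything
--     grid = [['#' if x == 0 or x == tw - 1 or y == 0 or y == th - 1 else c
--              for x, c in enumerate(row)] for y, row in enumerate(grid)]
--     return grid
-- ===== Notes on version B (the rewrite author's own statement) =====
-- stated objective: alternative
-- what changed: Replaces A's single nested loop with a per-cell border/lava/pillar/floor if-elif cascade by four whole-grid passes (fill floor, paint lava, paint pillars avoiding lava, overwrite the border last), a different control decomposition of the same painting.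
import Mathlib
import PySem

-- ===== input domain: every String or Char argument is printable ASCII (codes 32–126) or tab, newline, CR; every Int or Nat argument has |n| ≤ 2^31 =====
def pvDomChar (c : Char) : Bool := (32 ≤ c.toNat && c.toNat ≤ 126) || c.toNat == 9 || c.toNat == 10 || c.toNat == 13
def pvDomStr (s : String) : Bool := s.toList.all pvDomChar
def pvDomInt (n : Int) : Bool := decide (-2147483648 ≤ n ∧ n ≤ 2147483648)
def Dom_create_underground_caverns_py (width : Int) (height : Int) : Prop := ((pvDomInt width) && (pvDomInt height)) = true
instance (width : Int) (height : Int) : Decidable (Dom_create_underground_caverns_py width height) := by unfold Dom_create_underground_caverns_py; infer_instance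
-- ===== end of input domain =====

-- B builds the grid in four whole-grid passes (floor, lava, pillars, border) instead of A's
-- per-cell if/elif cascade; same result, alternative decomposition (no speed claim).

-- ===== PORT A =====
-- literal transliteration of A's per-cell cascade: nested loops appending to row/map
def create_underground_caverns_py (width : Int) (height : Int) : List (List String) :=
  let tile_width := PySem.Int.floordiv width 32
  let tile_height := PySem.Int.floordiv height 32
  (PySem.List.pyRange 0 tile_height 1).foldl (fun underground_map y =>
    underground_map ++
      [(PySem.List.pyRange 0 tile_width 1).foldl (fun row x =>
        row ++
          [if x = 0 ∨ x = tile_width - 1 ∨ y = 0 ∨ y = tile_height - 1 then "#"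
           else if PySem.Int.mod (x + y) 7 = 0 then "L"
           else if PySem.Int.mod (x * y) 11 = 0 then "#"
           else "."]) []]) []

-- ===== PORT B =====
-- literal transliteration of Source B: grid of '.', then three enumerate-comprehension passes
def create_underground_caverns_py_alt (width : Int) (height : Int) : List (List String) :=
  let tw := PySem.Int.floordiv width 32
  let th := PySem.Int.floordiv height 32
  let grid0 := (PySem.List.pyRange 0 th 1).map (fun _ => (PySem.List.pyRange 0 tw 1).map (fun _ => "."))
  let grid1 := (PySem.List.enumerate grid0).map (fun yr =>
    (PySem.List.enumerate yr.2).map (fun xc =>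
      if PySem.Int.mod (xc.1 + yr.1) 7 = 0 then "L" else xc.2))
  let grid2 := (PySem.List.enumerate grid1).map (fun yr =>
    (PySem.List.enumerate yr.2).map (fun xc =>
      if PySem.Int.mod (xc.1 * yr.1) 11 = 0 ∧ xc.2 ≠ "L" then "#" else xc.2))
  let grid3 := (PySem.List.enumerate grid2).map (fun yr =>
    (PySem.List.enumerate yr.2).map (fun xc =>
      if xc.1 = 0 ∨ xc.1 = tw - 1 ∨ yr.1 = 0 ∨ yr.1 = th - 1 then "#" else xc.2))
  grid3

-- ===== PRECONDITION & SPEC =====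
def Spec_create_underground_caverns_py (width : Int) (height : Int) (out : List (List String)) : Prop := out = create_underground_caverns_py_alt width height
instance (width : Int) (height : Int) (out : List (List String)) : Decidable (Spec_create_underground_caverns_py width height out) := by unfold Spec_create_underground_caverns_py; infer_instance

-- ===== CLAIM (what is proved, stated in full; the proofs are below) =====
def Claim_equal_create_underground_caverns_py : Prop := ∀ (width : Int) (height : Int), Dom_create_underground_caverns_py width height → Spec_create_underground_caverns_py width height (create_underground_caverns_py width height)

-- ===== LEMMAS AND PROOFS =====

-- enumerating (from a) a map over pyRange a b 1 pairs each index with its image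
theorem pv_enumerate_map_pyRange {α : Type} (f : Int → α) (a b : Int) :
    PySem.List.enumerate ((PySem.List.pyRange a b 1).map f) a
      = (PySem.List.pyRange a b 1).map (fun i => (i, f i)) := by
  by_cases h : b ≤ a
  · rw [PySem.List.pyRange_one_eq_nil h]; rfl
  · rw [PySem.List.pyRange_one_cons (by omega)]
    simp only [List.map_cons, PySem.List.enumerate_cons]
    rw [pv_enumerate_map_pyRange f (a + 1) b]
termination_by (b - a).toNat
decreasing_by omega

-- one pass of B, applied to a grid given as a map-of-maps over ranges, composes pointwise
theorem pv_pass_eq {g : List (List String)} {f : Int → Int → String}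
    (tw th : Int) (step : Int → Int → String → String)
    (hg : g = (PySem.List.pyRange 0 th 1).map (fun y => (PySem.List.pyRange 0 tw 1).map (f y))) :
    (PySem.List.enumerate g).map (fun yr =>
        (PySem.List.enumerate yr.2).map (fun xc => step xc.1 yr.1 xc.2))
      = (PySem.List.pyRange 0 th 1).map (fun y =>
          (PySem.List.pyRange 0 tw 1).map (fun x => step x y (f y x))) := by
  subst hg
  rw [pv_enumerate_map_pyRange]
  rw [List.map_map]
  apply List.map_congr_left
  intro y _
  simp only [Function.comp]
  rw [pv_enumerate_map_pyRange]
  rw [List.map_map]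
  rfl

-- the per-cell cascade of A equals the composition of B's three painting steps
theorem pv_cell_eq (tw th x y : Int) :
    (if x = 0 ∨ x = tw - 1 ∨ y = 0 ∨ y = th - 1 then "#"
     else if PySem.Int.mod (x + y) 7 = 0 then "L"
     else if PySem.Int.mod (x * y) 11 = 0 then "#"
     else ".")
    = (if x = 0 ∨ x = tw - 1 ∨ y = 0 ∨ y = th - 1 then "#"
       else if PySem.Int.mod (x * y) 11 = 0 ∧
              (if PySem.Int.mod (x + y) 7 = 0 then "L" else ".") ≠ "L" then "#"
       else if PySem.Int.mod (x + y) 7 = 0 then "L" else ".") := by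
  split_ifs with h1 h2 h3 h4 h5 h6 <;> simp_all

-- ===== VERDICT (by name: the statement is the Claim_ definition above) =====
theorem create_underground_caverns_py_spec : Claim_equal_create_underground_caverns_py := by
  intro width height _
  unfold Spec_create_underground_caverns_py
  unfold create_underground_caverns_py create_underground_caverns_py_alt
  set tw := PySem.Int.floordiv width 32 with htw
  set th := PySem.Int.floordiv height 32 with hth
  simp only []
  rw [pv_pass_eq (f := fun _ _ => ".")
        (step := fun x y c => if PySem.Int.mod (x + y) 7 = 0 then "L" else c) tw th (hg := rfl)]
  rw [pv_pass_eq (f := fun y x => if PySem.Int.mod (x + y) 7 = 0 then "L" else ".")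
        (step := fun x y c => if PySem.Int.mod (x * y) 11 = 0 ∧ c ≠ "L" then "#" else c) tw th (hg := rfl)]
  rw [pv_pass_eq (f := fun y x =>
          if PySem.Int.mod (x * y) 11 = 0 ∧
             (if PySem.Int.mod (x + y) 7 = 0 then "L" else ".") ≠ "L" then "#"
          else if PySem.Int.mod (x + y) 7 = 0 then "L" else ".")
        (step := fun x y c => if x = 0 ∨ x = tw - 1 ∨ y = 0 ∨ y = th - 1 then "#" else c) tw th (hg := rfl)]
  rw [PySem.List.foldl_append_singleton_eq_map]
  apply List.map_congr_left
  intro y _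
  rw [PySem.List.foldl_append_singleton_eq_map]
  apply List.map_congr_left
  intro x _
  exact pv_cell_eq tw th x y
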